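-- pv_equiv track=rewrite | github.com/mghorbani2357/TT-Miner-Topology-Transaction-Miner-for-Mining-Closed-Itemset | utils/tools.py | bit_map_code
-- ===== SOURCE A (Python) =====
-- def bit_map_code(transaction, f_1, l_1):
--     bc = 0
--     for item in transaction:
--         if item in f_1:
--             f_1[item] += 1
--         else:
--             f_1[item] = 1
--             l_1.append(item)
--
--         bc += 2 ** l_1.index(item)
--
--     # return bc, transaction.__len__(), f_1, l_1
--     return bc, f_1, l_1
-- ===== SOURCE B (Python) =====
-- def bit_map_code(transaction, f_1, l_1):
--     # Same in-place updates of f_1 and l_1 as the original; bc is computed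
--     # afterwards from a per-transaction tally and an item->position index
--     # instead of accumulating 2**l_1.index(item) inside the scan.
--     local = {}
--     for item in transaction:
--         if item in f_1:
--             f_1[item] += 1
--         else:
--             f_1[item] = 1
--             l_1.append(item)
--         local[item] = local.get(item, 0) + 1
--     pos = {}
--     for i, it in enumerate(l_1):
--         if it not in pos:
--             pos[it] = i
--     bc = sum(c * 2 ** pos[item] for item, c in local.items())
--     return bc, f_1, l_1
-- ===== Notes on version B (the rewrite author's own statement) =====
-- stated objective: alternative
-- what changed: bc is no longer accumulated as 2**l_1.index(item) inside the scan (a repeated linear .index pass); instead the scan tallies a per-transaction counter, then one item->first-position dict is built from l_1 and bc = sum(count*2**pos) over the tally.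
import Mathlib
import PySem

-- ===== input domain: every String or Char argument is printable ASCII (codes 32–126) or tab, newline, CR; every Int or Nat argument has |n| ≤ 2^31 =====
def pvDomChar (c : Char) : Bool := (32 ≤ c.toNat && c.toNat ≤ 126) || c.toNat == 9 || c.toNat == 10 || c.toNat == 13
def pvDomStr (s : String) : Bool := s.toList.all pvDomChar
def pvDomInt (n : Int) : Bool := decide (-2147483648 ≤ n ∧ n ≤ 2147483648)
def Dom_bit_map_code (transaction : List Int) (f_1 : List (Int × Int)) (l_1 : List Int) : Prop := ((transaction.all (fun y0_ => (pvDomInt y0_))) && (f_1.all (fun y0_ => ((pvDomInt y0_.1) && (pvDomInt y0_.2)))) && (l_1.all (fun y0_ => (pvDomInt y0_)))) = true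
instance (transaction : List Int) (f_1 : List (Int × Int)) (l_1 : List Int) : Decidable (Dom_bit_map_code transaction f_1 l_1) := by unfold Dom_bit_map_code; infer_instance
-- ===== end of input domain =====

-- B replaces the per-item 2**l_1.index(item) accumulation by a per-transaction tally combined
-- with one item->first-position dict built from l_1 afterwards (alternative decomposition).
-- Python A mutates f_1 and l_1 in place; B performs the same mutations; equivalence here is about the returned triple.

-- ===== PORT A =====
def pvStepA (st : Int × PySem.Dict Int Int × List Int) (item : Int) : Int × PySem.Dict Int Int × List Int :=
  let (bc, f, l) := st
  if f.contains item then
    -- f_1[item] += 1; bc += 2 ** l_1.index(item)   (index raises when item ∉ l_1: outside Pre_)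
    (bc + 2 ^ ((PySem.List.index? l item).getD 0), f.modify item 0 (· + 1), l)
  else
    -- f_1[item] = 1; l_1.append(item); bc += 2 ** l_1.index(item)
    let l' := l ++ [item]
    (bc + 2 ^ ((PySem.List.index? l' item).getD 0), f.insert item 1, l')

def bit_map_code (transaction : List Int) (f_1 : List (Int × Int)) (l_1 : List Int) : Int × (List (Int × Int)) × List Int :=
  let r := transaction.foldl pvStepA (0, PySem.Dict.ofList f_1, l_1)
  (r.1, r.2.1.items, r.2.2)

-- ===== PORT B =====
def pvStepB (st : PySem.Dict Int Int × List Int × PySem.Dict Int Int) (item : Int) : PySem.Dict Int Int × List Int × PySem.Dict Int Int :=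
  let (f, l, loc) := st
  let fl := if f.contains item then (f.modify item 0 (· + 1), l) else (f.insert item 1, l ++ [item])
  (fl.1, fl.2, loc.insert item (loc.getD item 0 + 1))

def bit_map_code_alt (transaction : List Int) (f_1 : List (Int × Int)) (l_1 : List Int) : Int × (List (Int × Int)) × List Int :=
  let r := transaction.foldl pvStepB (PySem.Dict.ofList f_1, l_1, PySem.Dict.empty)
  let pos := (PySem.List.enumerate r.2.1).foldl
      (fun p iv => if p.contains iv.2 then p else p.insert iv.2 iv.1) (PySem.Dict.empty : PySem.Dict Int Int)
  let bc := r.2.2.items.foldl (fun acc q => acc + q.2 * 2 ^ (pos.getD q.1 0).toNat) 0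
  (bc, r.1.items, r.2.1)

-- ===== PRECONDITION & SPEC =====
-- Pre_ excludes exactly the inputs where A raises ValueError: a transaction item that is
-- already a key of f_1 but never occurs in l_1 is looked up with l_1.index and fails.
def Pre_bit_map_code (transaction : List Int) (f_1 : List (Int × Int)) (l_1 : List Int) : Prop :=
  ∀ x ∈ transaction, (PySem.Dict.ofList f_1).contains x = true → x ∈ l_1
instance (transaction : List Int) (f_1 : List (Int × Int)) (l_1 : List Int) : Decidable (Pre_bit_map_code transaction f_1 l_1) := by unfold Pre_bit_map_code; infer_instance
def pvWitness_bit_map_code : List Int × (List (Int × Int)) × List Int := ([1, 2, 1], [(2, 5)], [2])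

def Spec_bit_map_code (transaction : List Int) (f_1 : List (Int × Int)) (l_1 : List Int) (out : Int × (List (Int × Int)) × List Int) : Prop := out = bit_map_code_alt transaction f_1 l_1
instance (transaction : List Int) (f_1 : List (Int × Int)) (l_1 : List Int) (out : Int × (List (Int × Int)) × List Int) : Decidable (Spec_bit_map_code transaction f_1 l_1 out) := by unfold Spec_bit_map_code; infer_instance

-- ===== CLAIM (what is proved, stated in full; the proofs are below) =====
def Claim_equal_bit_map_code : Prop := ∀ (transaction : List Int) (f_1 : List (Int × Int)) (l_1 : List Int), Dom_bit_map_code transaction f_1 l_1 → Pre_bit_map_code transaction f_1 l_1 → Spec_bit_map_code transaction f_1 l_1 (bit_map_code transaction f_1 l_1)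

-- ===== LEMMAS AND PROOFS =====

-- the (f, l) components of the two folds coincide
theorem pv_fl_eq (ts : List Int) : ∀ (bc : Int) (f : PySem.Dict Int Int) (l : List Int) (loc : PySem.Dict Int Int),
    (ts.foldl pvStepB (f, l, loc)).1 = (ts.foldl pvStepA (bc, f, l)).2.1 ∧
    (ts.foldl pvStepB (f, l, loc)).2.1 = (ts.foldl pvStepA (bc, f, l)).2.2 := by
  induction ts with
  | nil => intro bc f l loc; exact ⟨rfl, rfl⟩
  | cons x ts ih =>
    intro bc f l loc
    simp only [List.foldl_cons, pvStepA, pvStepB]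
    by_cases h : f.contains x = true <;> simp only [h, if_true, if_false, Bool.false_eq_true] <;> exact ih _ _ _ _

-- the local-counter component of the B fold is the counter of ts
theorem pv_loc_eq (ts : List Int) : ∀ (f : PySem.Dict Int Int) (l : List Int) (loc : PySem.Dict Int Int),
    (ts.foldl pvStepB (f, l, loc)).2.2 = ts.foldl (fun d x => d.insert x (d.getD x 0 + 1)) loc := by
  induction ts with
  | nil => intro f l loc; rfl
  | cons x ts ih =>
    intro f l loc
    simp only [List.foldl_cons, pvStepB]
    by_cases h : f.contains x = true <;> simp only [h, if_true, if_false, Bool.false_eq_true] <;> exact ih _ _ _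

-- the invariant: every transaction item that is a key of f occurs in l
def pvInv (ts : List Int) (f : PySem.Dict Int Int) (l : List Int) : Prop :=
  ∀ x ∈ ts, f.contains x = true → x ∈ l

-- the A fold: l grows by appends, all processed items end in the final l, and bc sums 2^(first index in the FINAL l)
theorem pv_mainA (ts : List Int) : ∀ (bc : Int) (f : PySem.Dict Int Int) (l : List Int),
    pvInv ts f l →
    (∃ s, (ts.foldl pvStepA (bc, f, l)).2.2 = l ++ s) ∧
    (∀ x ∈ ts, x ∈ (ts.foldl pvStepA (bc, f, l)).2.2) ∧
    (ts.foldl pvStepA (bc, f, l)).1 =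
      bc + (ts.map (fun x => (2 : Int) ^ ((PySem.List.index? (ts.foldl pvStepA (bc, f, l)).2.2 x).getD 0))).sum := by
  induction ts with
  | nil => intro bc f l _; exact ⟨⟨[], by simp⟩, by simp, by simp⟩
  | cons x ts ih =>
    intro bc f l hInv
    by_cases h : f.contains x = true
    · have hx : x ∈ l := hInv x (by simp) h
      have hInv' : pvInv ts (f.modify x 0 (· + 1)) l := by
        intro y hy hc
        have hc' : y = x ∨ f.contains y = true := by simpa [PySem.Dict.contains_modify] using hc
        rcases hc' with rfl | hc'
        · exact hInv y (by simp [hy]) h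
        · exact hInv y (by simp [hy]) hc'
      have step : (x :: ts).foldl pvStepA (bc, f, l)
          = ts.foldl pvStepA (bc + 2 ^ ((PySem.List.index? l x).getD 0), f.modify x 0 (· + 1), l) := by
        simp [List.foldl_cons, pvStepA, h]
      obtain ⟨⟨s, hs⟩, hmem, hbc⟩ := ih (bc + 2 ^ ((PySem.List.index? l x).getD 0)) (f.modify x 0 (· + 1)) l hInv'
      rw [step]
      have hxfin : x ∈ (ts.foldl pvStepA (bc + 2 ^ ((PySem.List.index? l x).getD 0), f.modify x 0 (· + 1), l)).2.2 := by
        rw [hs]; exact List.mem_append_left _ hx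
      have hidx : (PySem.List.index? (ts.foldl pvStepA (bc + 2 ^ ((PySem.List.index? l x).getD 0), f.modify x 0 (· + 1), l)).2.2 x).getD 0
          = (PySem.List.index? l x).getD 0 := by
        rw [hs, PySem.List.index?_append_of_mem s hx]
      refine ⟨⟨s, hs⟩, ?_, ?_⟩
      · intro y hy
        rcases List.mem_cons.mp hy with rfl | hy'
        · exact hxfin
        · exact hmem y hy'
      · rw [hbc, List.map_cons, List.sum_cons, hidx]; ring
    · have hB : f.contains x = false := by simpa using h
      have hInv' : pvInv ts (f.insert x 1) (l ++ [x]) := by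
        intro y hy hc
        rcases (by simpa [PySem.Dict.contains_insert] using hc : y = x ∨ f.contains y = true) with rfl | hc'
        · exact List.mem_append_right _ (by simp)
        · exact List.mem_append_left _ (hInv y (by simp [hy]) hc')
      have hx : x ∈ l ++ [x] := List.mem_append_right _ (by simp)
      have step : (x :: ts).foldl pvStepA (bc, f, l)
          = ts.foldl pvStepA (bc + 2 ^ ((PySem.List.index? (l ++ [x]) x).getD 0), f.insert x 1, l ++ [x]) := by
        simp [List.foldl_cons, pvStepA, hB]
      obtain ⟨⟨s, hs⟩, hmem, hbc⟩ := ih (bc + 2 ^ ((PySem.List.index? (l ++ [x]) x).getD 0)) (f.insert x 1) (l ++ [x]) hInv'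
      rw [step]
      have hxfin : x ∈ (ts.foldl pvStepA (bc + 2 ^ ((PySem.List.index? (l ++ [x]) x).getD 0), f.insert x 1, l ++ [x])).2.2 := by
        rw [hs]; exact List.mem_append_left _ hx
      have hidx : (PySem.List.index? (ts.foldl pvStepA (bc + 2 ^ ((PySem.List.index? (l ++ [x]) x).getD 0), f.insert x 1, l ++ [x])).2.2 x).getD 0
          = (PySem.List.index? (l ++ [x]) x).getD 0 := by
        rw [hs, PySem.List.index?_append_of_mem s hx]
      refine ⟨⟨[x] ++ s, by rw [hs, List.append_assoc]⟩, ?_, ?_⟩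
      · intro y hy
        rcases List.mem_cons.mp hy with rfl | hy'
        · exact hxfin
        · exact hmem y hy'
      · rw [hbc, List.map_cons, List.sum_cons, hidx]; ring

-- keys already present in the position dict keep their value through the rest of the scan
theorem pv_pos_contains (l : List Int) : ∀ (s : Int) (p : PySem.Dict Int Int) (x : Int), p.contains x = true →
    ((PySem.List.enumerate l s).foldl (fun p iv => if p.contains iv.2 then p else p.insert iv.2 iv.1) p).getD x 0 = p.getD x 0 := by
  induction l with
  | nil => intro s p x _; rfl
  | cons y l ih =>
    intro s p x hx
    rw [PySem.List.enumerate_cons, List.foldl_cons]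
    by_cases hy : p.contains y = true
    · simp only [hy, if_true]; exact ih _ _ _ hx
    · have hxy : x ≠ y := by rintro rfl; rw [hx] at hy; exact hy rfl
      simp only [hy, if_false, Bool.false_eq_true]
      rw [ih (s + 1) (p.insert y s) x (by simp [PySem.Dict.contains_insert, hx]),
        PySem.Dict.getD_insert_of_ne _ _ _ hxy]

-- the position dict records the FIRST index of each element of l (offset by the start s)
theorem pv_pos_getD (l : List Int) : ∀ (s : Int) (p : PySem.Dict Int Int) (x : Int), x ∈ l → p.contains x = false →
    ((PySem.List.enumerate l s).foldl (fun p iv => if p.contains iv.2 then p else p.insert iv.2 iv.1) p).getD x 0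
      = s + (((PySem.List.index? l x).getD 0 : Nat) : Int) := by
  induction l with
  | nil => intro s p x hx _; exact absurd hx (List.not_mem_nil)
  | cons y l ih =>
    intro s p x hxl hx
    rw [PySem.List.enumerate_cons, List.foldl_cons]
    by_cases hxy : x = y
    · subst hxy
      simp only [hx, if_false, Bool.false_eq_true]
      rw [pv_pos_contains l (s + 1) (p.insert x s) x (by simp),
        PySem.Dict.getD_insert_self, PySem.List.index?_cons_self]
      simp
    · have hxl' : x ∈ l := by rcases List.mem_cons.mp hxl with rfl | h; exact absurd rfl hxy; exact h
      obtain ⟨k, hk⟩ := Option.isSome_iff_exists.mp ((PySem.List.index?_isSome_iff l x).mpr hxl')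
      have step : ∀ q : PySem.Dict Int Int, q = (if p.contains y = true then p else p.insert y s) →
          q.contains x = false := by
        intro q hq; split at hq <;> subst hq
        · exact hx
        · rw [PySem.Dict.contains_insert]; simp [hx]; exact fun h => absurd h hxy
      rw [show (if p.contains y = true then p else p.insert y s) =
            (if p.contains y = true then p else p.insert y s) from rfl] at *
      rw [ih (s + 1) _ x hxl' (step _ rfl),
        PySem.List.index?_cons_of_ne l (show y ≠ x from fun h => hxy h.symm), hk]
      simp only [Option.map_some, Option.getD_some]
      push_cast
      ring

theorem pv_sum_map_add (S : List Int) (u v : Int → Int) :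
    (S.map (fun k => u k + v k)).sum = (S.map u).sum + (S.map v).sum := by
  induction S with
  | nil => simp
  | cons y S ih => simp [ih]; ring

theorem pv_indicator (g : Int → Int) (x : Int) : ∀ (S : List Int), S.Nodup → x ∈ S →
    (S.map (fun k => if x = k then g k else 0)).sum = g x := by
  intro S
  induction S with
  | nil => intro _ hx; exact absurd hx (List.not_mem_nil)
  | cons y S ih =>
    intro hnd hx
    rcases List.mem_cons.mp hx with rfl | hx'
    · have hnx : x ∉ S := (List.nodup_cons.mp hnd).1
      have hz : ∀ a ∈ S.map (fun k => if x = k then g k else 0), a = 0 := by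
        intro a ha
        obtain ⟨k, hk, rfl⟩ := List.mem_map.mp ha
        have : x ≠ k := by rintro rfl; exact hnx hk
        simp [this]
      simp only [List.map_cons, List.sum_cons]
      rw [List.sum_eq_zero hz]; simp
    · have hxy : x ≠ y := by rintro rfl; exact (List.nodup_cons.mp hnd).1 hx'
      simp only [List.map_cons, List.sum_cons, if_neg hxy,
        ih (List.nodup_cons.mp hnd).2 hx', zero_add]

theorem pv_grouped (g : Int → Int) (ts : List Int) : ∀ (S : List Int), S.Nodup → (∀ x ∈ ts, x ∈ S) →
    (S.map (fun k => ((ts.count k : Int)) * g k)).sum = (ts.map g).sum := by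
  induction ts with
  | nil =>
    intro S _ _
    have : ∀ a ∈ S.map (fun k => ((List.count k ([] : List Int) : Int)) * g k), a = 0 := by
      intro a ha; obtain ⟨k, _, rfl⟩ := List.mem_map.mp ha; simp
    rw [List.sum_eq_zero this]; simp
  | cons x ts ih =>
    intro S hnd hsub
    have hcount : ∀ k : Int, ((List.count k (x :: ts) : Int)) * g k
        = ((List.count k ts : Int)) * g k + (if x = k then g k else 0) := by
      intro k
      rw [List.count_cons]
      by_cases hk : x = k
      · subst hk; simp; ring
      · have : ¬ (k == x) = true := by simpa using fun h => hk h.symm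
        simp [hk]
    calc (S.map (fun k => ((List.count k (x :: ts) : Int)) * g k)).sum
        = (S.map (fun k => ((List.count k ts : Int)) * g k + (if x = k then g k else 0))).sum := by
          exact congrArg List.sum (List.map_congr_left (fun k _ => hcount k))
      _ = (S.map (fun k => ((List.count k ts : Int)) * g k)).sum
            + (S.map (fun k => if x = k then g k else 0)).sum := pv_sum_map_add S _ _
      _ = (ts.map g).sum + g x := by
          rw [ih S hnd (fun y hy => hsub y (List.mem_cons_of_mem _ hy)),
            pv_indicator g x S hnd (hsub x (List.mem_cons_self))]
      _ = ((x :: ts).map g).sum := by simp [List.map_cons, List.sum_cons]; ring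

-- ===== VERDICT (by name: the statement is the Claim_ definition above) =====
theorem bit_map_code_spec : Claim_equal_bit_map_code := by
  intro tr f1 l1 _ hPre
  unfold Spec_bit_map_code bit_map_code bit_map_code_alt
  have hfl := pv_fl_eq tr 0 (PySem.Dict.ofList f1) l1 PySem.Dict.empty
  obtain ⟨hpre, hmem, hbc⟩ := pv_mainA tr 0 (PySem.Dict.ofList f1) l1 hPre
  set rA := tr.foldl pvStepA (0, PySem.Dict.ofList f1, l1) with hrA
  set rB := tr.foldl pvStepB (PySem.Dict.ofList f1, l1, PySem.Dict.empty) with hrB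
  have hloc : rB.2.2 = PySem.Dict.counter tr := by
    rw [hrB, pv_loc_eq tr _ _ _, PySem.Dict.foldl_insert_getD_add_one_eq_counter]
  show (rA.1, rA.2.1.items, rA.2.2) =
    ((rB.2.2.items.foldl (fun acc q => acc + q.2 * 2 ^
        ((((PySem.List.enumerate rB.2.1).foldl (fun p iv => if p.contains iv.2 then p else p.insert iv.2 iv.1)
          (PySem.Dict.empty : PySem.Dict Int Int)).getD q.1 0).toNat)) 0), rB.1.items, rB.2.1)
  refine Prod.ext ?_ (Prod.ext ?_ ?_)
  · -- bc component
    show rA.1 = _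
    rw [hbc, hloc, PySem.Dict.items_counter]
    rw [PySem.List.foldl_add (g := fun q : Int × Int => q.2 * 2 ^
      ((((PySem.List.enumerate rB.2.1).foldl (fun p iv => if p.contains iv.2 then p else p.insert iv.2 iv.1)
        (PySem.Dict.empty : PySem.Dict Int Int)).getD q.1 0).toNat))]
    rw [List.map_map]
    have hL : rB.2.1 = rA.2.2 := hfl.2
    have hterm : ∀ k ∈ PySem.Set.ofList tr,
        ((fun q : Int × Int => q.2 * 2 ^
          ((((PySem.List.enumerate rB.2.1).foldl (fun p iv => if p.contains iv.2 then p else p.insert iv.2 iv.1)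
            (PySem.Dict.empty : PySem.Dict Int Int)).getD q.1 0).toNat)) ∘ (fun k => (k, (tr.count k : Int)))) k
        = ((tr.count k : Int)) * 2 ^ ((PySem.List.index? rA.2.2 k).getD 0) := by
      intro k hk
      have hk' : k ∈ tr := (PySem.Set.mem_ofList _ _).mp hk
      have hkL : k ∈ rB.2.1 := by rw [hL]; exact hmem k hk'
      simp only [Function.comp]
      rw [pv_pos_getD rB.2.1 0 PySem.Dict.empty k hkL (by simp)]
      rw [hL]
      norm_num
    rw [List.map_congr_left hterm]
    rw [pv_grouped (fun k => (2 : Int) ^ ((PySem.List.index? rA.2.2 k).getD 0)) tr (PySem.Set.ofList tr)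
      (PySem.Set.nodup_ofList tr) (fun x hx => (PySem.Set.mem_ofList _ _).mpr hx)]
  · show rA.2.1.items = rB.1.items
    rw [hfl.1]
  · exact hfl.2.symm
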